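-- pv_equiv track=rewrite | github.com/WhoIsWoony/algo_py | 백준/1744.py | solution
-- ===== SOURCE A (Python) =====
-- from queue import PriorityQueue
--
-- def solution(N, arr):
--     positive = PriorityQueue()
--     negative = PriorityQueue()
--     one = 0
--     zero = 0
--     for n in arr:
--         if n == 0:
--             zero += 1
--         elif n == 1:
--             one += 1
--         elif n >= 2:
--             positive.put(-n)
--         else:
--             negative.put(n)
--
--     answer = one
--     while positive.qsize() > 1:
--         answer += (-positive.get() * -positive.get())
--     while negative.qsize() > 1:
--         answer += (negative.get() * negative.get())
--
--     while positive.qsize() > 0: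
--         answer += (-positive.get())
--
--     if(zero == 0):
--         while negative.qsize() > 0:
--             answer += negative.get()
--
--     return answer
-- ===== SOURCE B (Python) =====
-- def solution(N, arr):
--     # frequency table instead of element-by-element pairing: walk the distinct
--     # values, read each pairing contribution off the multiplicity arithmetically
--     cnt = {}
--     for x in arr:
--         cnt[x] = cnt.get(x, 0) + 1
--     ans = cnt.get(1, 0)
--     carry = None
--     for v in sorted(k for k in cnt if k < 0):
--         c = cnt[v]
--         if carry is not None:
--             ans += carry * v
--             c -= 1
--             carry = None
--         ans += (c // 2) * (v * v)
--         if c % 2 == 1: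
--             carry = v
--     if carry is not None and 0 not in cnt:
--         ans += carry
--     carry = None
--     for v in sorted((k for k in cnt if k >= 2), reverse=True):
--         c = cnt[v]
--         if carry is not None:
--             ans += carry * v
--             c -= 1
--             carry = None
--         ans += (c // 2) * (v * v)
--         if c % 2 == 1:
--             carry = v
--     if carry is not None:
--         ans += carry
--     return ans
-- ===== Notes on version B (the rewrite author's own statement) =====
-- stated objective: faster
-- what changed: Replaces A's four PriorityQueue buckets and element-by-element drain loops by a frequency table: one dict counting pass, then a walk over the sorted DISTINCT values where each value's whole pairing contribution is computed arithmetically from its multiplicity ((c//2)*v*v plus a parity carry between values), so no per-element heap traffic or pairing happens at all.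
import Mathlib
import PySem

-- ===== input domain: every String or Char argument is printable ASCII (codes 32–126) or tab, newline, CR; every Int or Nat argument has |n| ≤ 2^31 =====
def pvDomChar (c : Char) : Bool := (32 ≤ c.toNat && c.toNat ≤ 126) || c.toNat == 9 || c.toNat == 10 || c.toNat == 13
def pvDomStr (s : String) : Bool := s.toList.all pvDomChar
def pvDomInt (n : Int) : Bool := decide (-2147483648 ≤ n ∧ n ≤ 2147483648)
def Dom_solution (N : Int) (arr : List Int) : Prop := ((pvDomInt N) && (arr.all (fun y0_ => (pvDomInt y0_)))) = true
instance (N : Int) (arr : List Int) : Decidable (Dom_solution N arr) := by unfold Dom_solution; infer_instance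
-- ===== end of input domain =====

-- B replaces A's four PriorityQueue buckets and element-by-element drain loops by a frequency
-- table: one counting pass over arr, then a walk over the sorted DISTINCT values where each
-- value's whole pairing contribution is computed arithmetically from its multiplicity
-- ((c//2)*v*v plus a parity carry between values); measurably faster (objective: faster).

-- ===== PORT A =====
-- PriorityQueue is modelled by its contract: a list kept sorted ascending; put = ordered
-- insertion (List.orderedInsert), get = pop the head (the minimum).
def pqStep (st : List Int × List Int × Int × Int) (n : Int) : List Int × List Int × Int × Int :=
  if n = 0 then (st.1, st.2.1, st.2.2.1, st.2.2.2 + 1)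
  else if n = 1 then (st.1, st.2.1, st.2.2.1 + 1, st.2.2.2)
  else if 2 ≤ n then (List.orderedInsert (· ≤ ·) (-n) st.1, st.2.1, st.2.2.1, st.2.2.2)
  else (st.1, List.orderedInsert (· ≤ ·) n st.2.1, st.2.2.1, st.2.2.2)

-- while positive.qsize() > 1: answer += (-positive.get() * -positive.get())
def drainPosPairs : List Int → Int
  | a :: b :: r => (-a) * (-b) + drainPosPairs r
  | _ => 0

-- while negative.qsize() > 1: answer += (negative.get() * negative.get())
def drainNegPairs : List Int → Int
  | a :: b :: r => a * b + drainNegPairs r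
  | _ => 0

-- what remains in a queue after a pair-draining loop
def pairRem : List Int → List Int
  | _ :: _ :: r => pairRem r
  | r => r

def solution (N : Int) (arr : List Int) : Int :=
  let st := arr.foldl pqStep (([] : List Int), ([] : List Int), (0 : Int), (0 : Int))
  let answer := st.2.2.1 + drainPosPairs st.1 + drainNegPairs st.2.1
      + (pairRem st.1).foldl (fun acc x => acc + (-x)) 0
  if st.2.2.2 = 0 then answer + (pairRem st.2.1).foldl (fun acc x => acc + x) 0 else answer

-- ===== PORT B =====
-- the loop body shared by both for-loops of Source B: consume one distinct value v with its
-- multiplicity cnt[v], pairing it with the carried element first, then pairing equal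
-- elements among themselves ((c//2)*v*v) and carrying v on if the multiplicity is odd
def runStep (cnt : PySem.Dict Int Int) (st : Int × Option Int) (v : Int) : Int × Option Int :=
  let c0 := cnt.getD v 0
  match st.2 with
  | some p =>
      let c := c0 - 1
      (st.1 + p * v + PySem.Int.floordiv c 2 * (v * v),
       if PySem.Int.mod c 2 == 1 then some v else none)
  | none =>
      (st.1 + PySem.Int.floordiv c0 2 * (v * v),
       if PySem.Int.mod c0 2 == 1 then some v else none)

def solution_alt (N : Int) (arr : List Int) : Int :=
  -- cnt = {}; for x in arr: cnt[x] = cnt.get(x, 0) + 1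
  let cnt := arr.foldl (fun d x => d.insert x (d.getD x 0 + 1)) PySem.Dict.empty
  -- ans = cnt.get(1, 0)
  let a0 := cnt.getD 1 0
  -- for v in sorted(k for k in cnt if k < 0): …
  let p := (PySem.List.sorted (cnt.keys.filter (fun k => decide (k < 0))) (fun x => x) false).foldl
      (runStep cnt) (a0, none)
  -- if carry is not None and 0 not in cnt: ans += carry
  let a1 := p.1 + (match p.2 with
    | some carry => if cnt.contains 0 then 0 else carry
    | none => 0)
  -- for v in sorted((k for k in cnt if k >= 2), reverse=True): …
  let q := (PySem.List.sorted (cnt.keys.filter (fun k => decide (2 ≤ k))) (fun x => x) true).foldl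
      (runStep cnt) (a1, none)
  q.1 + (match q.2 with | some carry => carry | none => 0)

-- ===== PRECONDITION & SPEC =====
def Spec_solution (N : Int) (arr : List Int) (out : Int) : Prop := out = solution_alt N arr
instance (N : Int) (arr : List Int) (out : Int) : Decidable (Spec_solution N arr out) := by unfold Spec_solution; infer_instance

-- ===== CLAIM (what is proved, stated in full; the proofs are below) =====
def Claim_equal_solution : Prop := ∀ (N : Int) (arr : List Int), Dom_solution N arr → Spec_solution N arr (solution N arr)

-- ===== LEMMAS AND PROOFS =====

-- two-step list induction matching the pairing recursions
def pairInd {motive : List Int → Prop} (h0 : motive []) (h1 : ∀ a, motive [a])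
    (h2 : ∀ a b r, motive r → motive (a :: b :: r)) : ∀ l, motive l
  | [] => h0
  | [a] => h1 a
  | a :: b :: r => h2 a b r (pairInd h0 h1 h2 r)

-- two-step Nat induction for run-length arguments
def nat2Ind {motive : Nat → Prop} (h0 : motive 0) (h1 : motive 1)
    (h2 : ∀ n, motive n → motive (n + 2)) : ∀ n, motive n
  | 0 => h0
  | 1 => h1
  | n + 2 => h2 n (nat2Ind h0 h1 h2 n)

lemma pairRem_nil_or_singleton (l : List Int) :
    pairRem l = [] ∨ ∃ a, a ∈ l ∧ pairRem l = [a] := by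
  induction l using pairInd with
  | h0 => left; rfl
  | h1 a => right; exact ⟨a, by simp, rfl⟩
  | h2 a b r ih =>
      rcases ih with h | ⟨c, hc, h⟩
      · left; simpa [pairRem] using h
      · right; exact ⟨c, by simp [hc], by simpa [pairRem] using h⟩

-- the build loop of A, bucket by bucket
lemma foldA (arr : List Int) : ∀ p n o z,
    arr.foldl pqStep (p, n, o, z) =
      ( ((arr.filter (fun x => decide (2 ≤ x))).map (fun x => -x)).foldl
          (fun q x => List.orderedInsert (· ≤ ·) x q) p,
        (arr.filter (fun x => decide (x < 0))).foldl
          (fun q x => List.orderedInsert (· ≤ ·) x q) n,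
        o + (arr.count 1 : Int),
        z + (arr.count 0 : Int) ) := by
  induction arr with
  | nil => intro p n o z; simp
  | cons a t ih =>
      intro p n o z
      by_cases h0 : a = 0
      · simp [pqStep, h0, ih]; ring
      · by_cases h1 : a = 1
        · simp [pqStep, h1, ih]; ring
        · by_cases h2 : 2 ≤ a
          · have : ¬ a < 0 := by omega
            simp [pqStep, h0, h1, h2, ih, this]
          · have hn : a < 0 := by omega
            simp [pqStep, h0, h1, h2, ih, hn]

-- repeated ordered insertion builds a sorted permutation
lemma foldIns_sorted_perm (l : List Int) : ∀ q : List Int, q.Pairwise (· ≤ ·) →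
    (l.foldl (fun q x => List.orderedInsert (· ≤ ·) x q) q).Pairwise (· ≤ ·) ∧
    (l.foldl (fun q x => List.orderedInsert (· ≤ ·) x q) q).Perm (q ++ l) := by
  induction l with
  | nil => intro q hq; simpa using hq
  | cons a t ih =>
      intro q hq
      have hs : (List.orderedInsert (· ≤ ·) a q).Pairwise (· ≤ ·) :=
        List.Pairwise.orderedInsert a q hq
      obtain ⟨h1, h2⟩ := ih _ hs
      refine ⟨h1, h2.trans ?_⟩
      have h3 := (List.perm_orderedInsert (· ≤ ·) a q).append_right t
      exact h3.trans (by simpa using (List.perm_middle (a := a) (l₁ := q) (l₂ := t)).symm)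

lemma drainPos_map_neg (l : List Int) :
    drainPosPairs (l.map (fun x => -x)) = drainNegPairs l := by
  induction l using pairInd with
  | h0 => rfl
  | h1 a => rfl
  | h2 a b r ih => simp [drainPosPairs, drainNegPairs, ih]

lemma pairRem_map (f : Int → Int) (l : List Int) :
    pairRem (l.map f) = (pairRem l).map f := by
  induction l using pairInd with
  | h0 => rfl
  | h1 a => rfl
  | h2 a b r ih => simpa [pairRem] using ih

-- the negative and the ≥2 class of arr, each in sorted order
def negsOf (arr : List Int) : List Int := PySem.List.sorted (arr.filter (fun x => decide (x < 0))) (fun x => x) false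
def bigsOf (arr : List Int) : List Int := PySem.List.sorted (arr.filter (fun x => decide (2 ≤ x))) (fun x => x) false

lemma count_filter_zero {arr : List Int} {p : Int → Bool} {x : Int} (h : p x = false) :
    (arr.filter p).count x = 0 :=
  List.count_eq_zero.2 (fun hm => by have := (List.mem_filter.1 hm).2; rw [h] at this; exact absurd this (by simp))

-- A's positive queue is the ≥2 class, reversed and negated
lemma posQueue_eq (arr : List Int) :
    ((arr.filter (fun x => decide (2 ≤ x))).map (fun x => -x)).foldl
      (fun q x => List.orderedInsert (· ≤ ·) x q) [] = ((bigsOf arr).reverse).map (fun x => -x) := by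
  obtain ⟨hp, hperm⟩ := foldIns_sorted_perm ((arr.filter (fun x => decide (2 ≤ x))).map (fun x => -x)) [] (by simp)
  refine List.Perm.eq_of_pairwise (fun a b _ _ h1 h2 => le_antisymm h1 h2) hp ?_ ?_
  · rw [List.pairwise_map, List.pairwise_reverse]
    have hB : (bigsOf arr).Pairwise (· ≤ ·) := by
      simpa using PySem.List.sorted_pairwise (arr.filter (fun x => decide (2 ≤ x))) (fun x => x)
    exact hB.imp (by intro a b h; simpa using h)
  · have h2 : (((bigsOf arr).reverse).map (fun x => -x)).Perm
        ((arr.filter (fun x => decide (2 ≤ x))).map (fun x => -x)) :=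
      List.Perm.map _ (((bigsOf arr).reverse_perm).trans (PySem.List.sorted_perm _ _ _))
    exact (hperm.trans (by simp)).trans h2.symm

-- A's negative queue is the sorted negative class
lemma negQueue_eq (arr : List Int) :
    (arr.filter (fun x => decide (x < 0))).foldl
      (fun q x => List.orderedInsert (· ≤ ·) x q) [] = negsOf arr := by
  obtain ⟨hp, hperm⟩ := foldIns_sorted_perm (arr.filter (fun x => decide (x < 0))) [] (by simp)
  refine List.Perm.eq_of_pairwise (fun a b _ _ h1 h2 => le_antisymm h1 h2) hp ?_ ?_
  · simpa using PySem.List.sorted_pairwise (arr.filter (fun x => decide (x < 0))) (fun x => x)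
  · exact (hperm.trans (by simp)).trans (PySem.List.sorted_perm _ _ _).symm

-- ===== B-side lemmas: run-length arithmetic over distinct values =====

-- the multiset a list of distinct values denotes, each value replicated cnt[v] times
def expandC (cnt : PySem.Dict Int Int) : List Int → List Int
  | [] => []
  | v :: r => List.replicate (cnt.getD v 0).toNat v ++ expandC cnt r

lemma mem_expandC (cnt : PySem.Dict Int Int) : ∀ (vs : List Int) (x : Int), x ∈ expandC cnt vs → x ∈ vs := by
  intro vs
  induction vs with
  | nil => simp [expandC]
  | cons v r ih =>
      intro x hx
      rcases List.mem_append.1 hx with h | h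
      · simp [List.eq_of_mem_replicate h]
      · exact List.mem_cons_of_mem _ (ih x h)

lemma expand_pairwise (cnt : PySem.Dict Int Int) (R : Int → Int → Prop) (hR : ∀ v, R v v) :
    ∀ vs : List Int, vs.Pairwise R → (expandC cnt vs).Pairwise R := by
  intro vs
  induction vs with
  | nil => intro _; simp [expandC]
  | cons v r ih =>
      intro hp
      obtain ⟨hhead, htail⟩ := List.pairwise_cons.1 hp
      rw [expandC, List.pairwise_append]
      refine ⟨List.pairwise_replicate.2 (Or.inr (hR v)), ih htail, ?_⟩
      intro a ha b hb
      rw [List.eq_of_mem_replicate ha]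
      exact hhead b (mem_expandC cnt r b hb)

lemma count_expandC (cnt : PySem.Dict Int Int) :
    ∀ vs : List Int, vs.Nodup → ∀ x : Int,
      (expandC cnt vs).count x = if x ∈ vs then (cnt.getD x 0).toNat else 0 := by
  intro vs
  induction vs with
  | nil => intro _ x; simp [expandC]
  | cons v r ih =>
      intro hnd x
      obtain ⟨hv, hr⟩ := List.nodup_cons.1 hnd
      rw [expandC, List.count_append, List.count_replicate, ih hr x]
      by_cases hxv : x = v
      · subst hxv
        simp [hv]
      · by_cases hxr : x ∈ r <;> simp [hxv, hxr, Ne.symm hxv]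

-- pairing a constant run: the whole run contributes (n/2)·v² and its parity survives
lemma drain_repl (v : Int) : ∀ (n : Nat) (l : List Int),
    drainNegPairs (List.replicate n v ++ l) =
      ((n / 2 : Nat) : Int) * (v * v) + drainNegPairs (List.replicate (n % 2) v ++ l) ∧
    pairRem (List.replicate n v ++ l) = pairRem (List.replicate (n % 2) v ++ l) := by
  intro n
  induction n using nat2Ind with
  | h0 => intro l; simp
  | h1 => intro l; simp
  | h2 n ih =>
      intro l
      have e : List.replicate (n + 2) v ++ l = v :: v :: (List.replicate n v ++ l) := by
        simp [List.replicate_succ]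
      obtain ⟨ih1, ih2⟩ := ih l
      have hd : (n + 2) / 2 = n / 2 + 1 := by omega
      have hm : (n + 2) % 2 = n % 2 := by omega
      constructor
      · rw [e]
        show v * v + drainNegPairs (List.replicate n v ++ l) = _
        rw [ih1, hd, hm]; push_cast; ring
      · rw [e]
        show pairRem (List.replicate n v ++ l) = _
        rw [ih2, hm]

lemma fdmd (c : Int) (h : 0 ≤ c) :
    PySem.Int.floordiv c 2 = ((c.toNat / 2 : Nat) : Int) ∧
    PySem.Int.mod c 2 = ((c.toNat % 2 : Nat) : Int) := by
  rw [PySem.Int.floordiv_eq_ediv_of_pos (by norm_num), PySem.Int.mod_eq_emod_of_pos (by norm_num)]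
  constructor <;> omega

-- the carry loop over distinct values computes the pair-drain of the expanded multiset
lemma runFold_eq (cnt : PySem.Dict Int Int) :
    ∀ (vs : List Int), (∀ v ∈ vs, 1 ≤ cnt.getD v 0) → ∀ (a : Int) (carry : Option Int),
    vs.foldl (runStep cnt) (a, carry) =
      (a + drainNegPairs (carry.toList ++ expandC cnt vs),
       (pairRem (carry.toList ++ expandC cnt vs)).head?) := by
  intro vs
  induction vs with
  | nil =>
      intro _ a carry
      cases carry <;> simp [expandC, drainNegPairs, pairRem]
  | cons v r ih =>
      intro h a carry
      have hc0 : 1 ≤ cnt.getD v 0 := h v (by simp)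
      have hr : ∀ w ∈ r, 1 ≤ cnt.getD w 0 := fun w hw => h w (List.mem_cons_of_mem _ hw)
      have hE : expandC cnt (v :: r) = List.replicate (cnt.getD v 0).toNat v ++ expandC cnt r := rfl
      cases carry with
      | none =>
          obtain ⟨hfd, hmd⟩ := fdmd (cnt.getD v 0) (by omega)
          have hD := drain_repl v (cnt.getD v 0).toNat (expandC cnt r)
          rcases Nat.mod_two_eq_zero_or_one (cnt.getD v 0).toNat with hp | hp
          · have hstep : runStep cnt (a, none) v =
                (a + (((cnt.getD v 0).toNat / 2 : Nat) : Int) * (v * v), none) := by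
              simp [runStep, hfd, hmd, hp]
              exact ⟨Or.inl (by omega), by omega⟩
            rw [List.foldl_cons, hstep, ih hr]
            rw [hp] at hD
            simp only [hE, Option.toList, List.nil_append]
            rw [hD.1, hD.2]
            simp only [List.replicate_zero, List.replicate_one, List.nil_append,
              List.singleton_append, List.cons_append]
            exact Prod.ext_iff.mpr ⟨by ring, rfl⟩
          · have hstep : runStep cnt (a, none) v =
                (a + (((cnt.getD v 0).toNat / 2 : Nat) : Int) * (v * v), some v) := by
              simp [runStep, hfd, hmd, hp]
              exact ⟨Or.inl (by omega), by omega⟩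
            rw [List.foldl_cons, hstep, ih hr]
            rw [hp] at hD
            simp only [hE, Option.toList, List.nil_append]
            rw [hD.1, hD.2]
            simp only [List.replicate_zero, List.replicate_one, List.nil_append,
              List.singleton_append, List.cons_append]
            exact Prod.ext_iff.mpr ⟨by ring, rfl⟩
      | some p =>
          have hc' : cnt.getD v 0 - 1 = (((cnt.getD v 0).toNat - 1 : Nat) : Int) := by omega
          have htn : (cnt.getD v 0 - 1).toNat = (cnt.getD v 0).toNat - 1 := by omega
          obtain ⟨hfd, hmd⟩ := fdmd (cnt.getD v 0 - 1) (by omega)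
          rw [htn] at hfd hmd
          have hD := drain_repl v ((cnt.getD v 0).toNat - 1) (expandC cnt r)
          have hrepl : List.replicate (cnt.getD v 0).toNat v =
              v :: List.replicate ((cnt.getD v 0).toNat - 1) v := by
            obtain ⟨k, hk⟩ : ∃ k, (cnt.getD v 0).toNat = k + 1 :=
              ⟨(cnt.getD v 0).toNat - 1, by omega⟩
            rw [hk]
            simp [List.replicate_succ]
          rcases Nat.mod_two_eq_zero_or_one ((cnt.getD v 0).toNat - 1) with hp | hp
          · have hstep : runStep cnt (a, some p) v =
                (a + p * v + ((((cnt.getD v 0).toNat - 1) / 2 : Nat) : Int) * (v * v), none) := by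
              simp [runStep, hfd, hmd, hp]
              exact ⟨Or.inl (by omega), by omega⟩
            rw [List.foldl_cons, hstep, ih hr]
            rw [hp] at hD
            simp only [hE, hrepl, Option.toList, List.cons_append, List.singleton_append]
            show _ = (a + (p * v + drainNegPairs (List.replicate ((cnt.getD v 0).toNat - 1) v ++ expandC cnt r)),
                (pairRem (List.replicate ((cnt.getD v 0).toNat - 1) v ++ expandC cnt r)).head?)
            rw [hD.1, hD.2]
            simp only [List.replicate_zero, List.replicate_one, List.nil_append,
              List.singleton_append, List.cons_append]
            exact Prod.ext_iff.mpr ⟨by ring, rfl⟩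
          · have hstep : runStep cnt (a, some p) v =
                (a + p * v + ((((cnt.getD v 0).toNat - 1) / 2 : Nat) : Int) * (v * v), some v) := by
              simp [runStep, hfd, hmd, hp]
              exact ⟨Or.inl (by omega), by omega⟩
            rw [List.foldl_cons, hstep, ih hr]
            rw [hp] at hD
            simp only [hE, hrepl, Option.toList, List.cons_append, List.singleton_append]
            show _ = (a + (p * v + drainNegPairs (List.replicate ((cnt.getD v 0).toNat - 1) v ++ expandC cnt r)),
                (pairRem (List.replicate ((cnt.getD v 0).toNat - 1) v ++ expandC cnt r)).head?)
            rw [hD.1, hD.2]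
            simp only [List.replicate_zero, List.replicate_one, List.nil_append,
              List.singleton_append, List.cons_append]
            exact Prod.ext_iff.mpr ⟨by ring, rfl⟩

-- expanding the sorted distinct negative keys recovers the sorted negative class
lemma expand_negs (arr : List Int) :
    expandC (PySem.Dict.counter arr)
      (PySem.List.sorted ((PySem.Set.ofList arr).filter (fun k => decide (k < 0))) (fun x => x) false)
      = negsOf arr := by
  set vs := PySem.List.sorted ((PySem.Set.ofList arr).filter (fun k => decide (k < 0))) (fun x => x) false with hvs
  have hvsmem : ∀ x : Int, x ∈ vs ↔ x ∈ arr ∧ x < 0 := by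
    intro x
    rw [hvs, PySem.List.mem_sorted, List.mem_filter, PySem.Set.mem_ofList]
    simp
  have hnd : vs.Nodup :=
    (PySem.List.sorted_perm _ _ _).nodup_iff.2 (List.Nodup.filter _ (PySem.Set.nodup_ofList arr))
  have hpw : vs.Pairwise (· ≤ ·) := by
    simpa using PySem.List.sorted_pairwise ((PySem.Set.ofList arr).filter (fun k => decide (k < 0))) (fun x => x)
  exact (PySem.List.sorted_id_eq_of_perm_of_pairwise _ _
    (by
      rw [List.perm_iff_count]
      intro x
      rw [count_expandC _ vs hnd x, PySem.Dict.getD_counter]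
      by_cases hneg : x < 0
      · by_cases hmem : x ∈ arr
        · rw [List.count_filter (by simpa using hneg)]
          simp [hvsmem, hneg, hmem]
        · simp [hvsmem, hneg, hmem, List.count_eq_zero.2 hmem,
            List.count_eq_zero.2 (fun hc => hmem (List.mem_filter.1 hc).1)]
      · rw [count_filter_zero (by simpa using hneg)]
        simp [hvsmem, hneg])
    (expand_pairwise _ _ (fun v => le_refl v) vs hpw)).symm

-- expanding the reverse-sorted distinct ≥2 keys recovers the reversed sorted ≥2 class
lemma expand_bigs (arr : List Int) :
    expandC (PySem.Dict.counter arr)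
      (PySem.List.sorted ((PySem.Set.ofList arr).filter (fun k => decide (2 ≤ k))) (fun x => x) true)
      = (bigsOf arr).reverse := by
  set vs := PySem.List.sorted ((PySem.Set.ofList arr).filter (fun k => decide (2 ≤ k))) (fun x => x) true with hvs
  have hvsmem : ∀ x : Int, x ∈ vs ↔ x ∈ arr ∧ 2 ≤ x := by
    intro x
    rw [hvs, PySem.List.mem_sorted, List.mem_filter, PySem.Set.mem_ofList]
    simp
  have hnd : vs.Nodup :=
    (PySem.List.sorted_perm _ _ _).nodup_iff.2 (List.Nodup.filter _ (PySem.Set.nodup_ofList arr))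
  have hpw : vs.Pairwise (fun a b => b ≤ a) := by
    simpa using PySem.List.sorted_pairwise_rev ((PySem.Set.ofList arr).filter (fun k => decide (2 ≤ k))) (fun x => x)
  have key : bigsOf arr = (expandC (PySem.Dict.counter arr) vs).reverse := by
    apply PySem.List.sorted_id_eq_of_perm_of_pairwise
    · rw [List.perm_iff_count]
      intro x
      rw [List.count_reverse, count_expandC _ vs hnd x, PySem.Dict.getD_counter]
      by_cases hbig : 2 ≤ x
      · by_cases hmem : x ∈ arr
        · rw [List.count_filter (by simpa using hbig)]
          simp [hvsmem, hbig, hmem]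
        · simp [hvsmem, hbig, hmem, List.count_eq_zero.2 hmem,
            List.count_eq_zero.2 (fun hc => hmem (List.mem_filter.1 hc).1)]
      · rw [count_filter_zero (by simpa using hbig)]
        simp [hvsmem, hbig]
    · exact List.pairwise_reverse.2 (expand_pairwise _ (fun a b => b ≤ a) (fun v => le_refl v) vs hpw)
  rw [key, List.reverse_reverse]

-- ===== VERDICT (by name: the statement is the Claim_ definition above) =====
theorem solution_spec : Claim_equal_solution := by
  intro N arr _
  show solution N arr = solution_alt N arr
  -- A's state after the build loop
  have hA : arr.foldl pqStep (([] : List Int), ([] : List Int), (0:Int), (0:Int)) =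
      ( ((bigsOf arr).reverse).map (fun x => -x), negsOf arr,
        0 + (arr.count 1 : Int), 0 + (arr.count 0 : Int) ) := by
    rw [foldA, posQueue_eq, negQueue_eq]
  -- B's dict is the counter of arr
  have hcnt : arr.foldl (fun d x => d.insert x (d.getD x 0 + 1)) PySem.Dict.empty =
      PySem.Dict.counter arr := PySem.Dict.foldl_insert_getD_add_one_eq_counter arr
  have hposcnt : ∀ v ∈ PySem.List.sorted ((PySem.Set.ofList arr).filter (fun k => decide (k < 0))) (fun x => x) false,
      1 ≤ (PySem.Dict.counter arr).getD v 0 := by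
    intro v hv
    have hmem : v ∈ arr := by
      have := (PySem.List.mem_sorted _ _ _ _).1 hv
      exact (PySem.Set.mem_ofList _ _).1 (List.mem_filter.1 this).1
    rw [PySem.Dict.getD_counter]
    exact_mod_cast Nat.one_le_iff_ne_zero.2 (fun hc => (List.count_eq_zero.1 hc) hmem)
  have hbigcnt : ∀ v ∈ PySem.List.sorted ((PySem.Set.ofList arr).filter (fun k => decide (2 ≤ k))) (fun x => x) true,
      1 ≤ (PySem.Dict.counter arr).getD v 0 := by
    intro v hv
    have hmem : v ∈ arr := by
      have := (PySem.List.mem_sorted _ _ _ _).1 hv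
      exact (PySem.Set.mem_ofList _ _).1 (List.mem_filter.1 this).1
    rw [PySem.Dict.getD_counter]
    exact_mod_cast Nat.one_le_iff_ne_zero.2 (fun hc => (List.count_eq_zero.1 hc) hmem)
  have hcont : (PySem.Dict.counter arr).contains 0 = !(arr.count 0 == 0) := by
    rw [PySem.Dict.contains_counter]
    by_cases hz : (0:Int) ∈ arr
    · simp [hz, List.count_eq_zero, hz]
    · simp [hz, List.count_eq_zero.2 hz]
  simp only [solution, solution_alt, hA, hcnt, PySem.Dict.keys_counter, PySem.Dict.getD_counter]
  rw [runFold_eq _ _ hposcnt, runFold_eq _ _ hbigcnt, expand_negs, expand_bigs, hcont]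
  rw [drainPos_map_neg, pairRem_map]
  simp only [Option.toList, List.nil_append]
  rcases pairRem_nil_or_singleton ((bigsOf arr).reverse) with hbr | ⟨c, hcMem, hbr⟩ <;>
    rcases pairRem_nil_or_singleton (negsOf arr) with hrem | ⟨a, haMem, hrem⟩ <;>
      rw [hrem, hbr] <;>
        by_cases hz : arr.count 0 = 0 <;>
          simp [hz] <;> ring
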